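-- pv_equiv track=rewrite | github.com/SymmetricChaos/MyOtherMathStuff | Shuffling/Shuffles.py | _mongean
-- ===== SOURCE A (Python) =====
-- from itertools import cycle
--
-- def _mongean(D):
--     L = D.copy()
--     R = []
--
--     C = cycle([0,1])
--     while len(L) > 0:
--         if next(C) == 0:
--             R = R + [L.pop(0)]
--         else:
--             R = [L.pop(0)] + R
--
--     return R
-- ===== SOURCE B (Python) =====
-- def _mongean(D):
--     evens = D[0::2]
--     odds = D[1::2]
--     return list(reversed(odds)) + evens
-- ===== Notes on version B (the rewrite author's own statement) =====
-- stated objective: simpler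
-- what changed: Replaces the alternating cycle/pop(0) loop with a direct two-slice computation: reversed odd-index slice concatenated with the even-index slice.
import Mathlib
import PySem

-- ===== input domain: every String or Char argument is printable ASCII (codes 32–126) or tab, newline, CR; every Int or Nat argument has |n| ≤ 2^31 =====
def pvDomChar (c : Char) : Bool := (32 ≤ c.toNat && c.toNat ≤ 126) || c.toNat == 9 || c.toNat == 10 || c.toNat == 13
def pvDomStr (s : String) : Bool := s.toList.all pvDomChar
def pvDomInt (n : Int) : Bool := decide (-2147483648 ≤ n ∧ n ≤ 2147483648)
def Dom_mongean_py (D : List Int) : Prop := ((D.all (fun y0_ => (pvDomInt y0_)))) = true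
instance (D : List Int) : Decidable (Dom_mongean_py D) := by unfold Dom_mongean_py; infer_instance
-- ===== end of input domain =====

-- ===== PORT A =====
-- B is simpler/faster: it replaces A's alternating cycle/pop(0) loop with a reversed odd-index slice ++ even-index slice.
-- literal port of A's while-loop: L, R, and the cycled bit c (next(C) = 0,1,0,1,...)
def mongeanLoop : List Int → Int → List Int → List Int
  | [], _, R => R
  | x :: L, c, R => if c == 0 then mongeanLoop L 1 (R ++ [x]) else mongeanLoop L 0 ([x] ++ R)

def mongean_py (D : List Int) : List Int := mongeanLoop D 0 []

-- ===== PORT B =====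
-- hand port of the extended slice D[a::2] (every second element), exact for step 2 on lists
def everyOther : List Int → List Int
  | [] => []
  | [x] => [x]
  | x :: _ :: rest => x :: everyOther rest

def mongean_py_alt (D : List Int) : List Int :=
  let evens := everyOther D          -- D[0::2]
  let odds := everyOther D.tail      -- D[1::2]
  odds.reverse ++ evens

-- ===== PRECONDITION & SPEC =====
def Spec_mongean_py (D : List Int) (out : List Int) : Prop := out = mongean_py_alt D
instance (D : List Int) (out : List Int) : Decidable (Spec_mongean_py D out) := by unfold Spec_mongean_py; infer_instance

-- ===== CLAIM (what is proved, stated in full; the proofs are below) =====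
def Claim_equal_mongean_py : Prop := ∀ (D : List Int), Dom_mongean_py D → Spec_mongean_py D (mongean_py D)

-- ===== LEMMAS AND PROOFS =====
theorem everyOther_cons (y : Int) (rest : List Int) :
    everyOther (y :: rest) = y :: everyOther rest.tail := by
  cases rest <;> simp [everyOther]

theorem mongeanLoop_eq : ∀ (L R : List Int),
    mongeanLoop L 0 R = (everyOther L.tail).reverse ++ R ++ everyOther L
  | [], R => by simp [mongeanLoop, everyOther]
  | [x], R => by simp [mongeanLoop, everyOther]
  | x :: y :: rest, R => by
      have h : mongeanLoop (x :: y :: rest) 0 R = mongeanLoop rest 0 ([y] ++ (R ++ [x])) := by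
        simp [mongeanLoop]
      rw [h, mongeanLoop_eq rest ([y] ++ (R ++ [x]))]
      simp [everyOther_cons]

-- ===== VERDICT (by name: the statement is the Claim_ definition above) =====
theorem mongean_py_spec : Claim_equal_mongean_py := by
  intro D _
  unfold Spec_mongean_py mongean_py mongean_py_alt
  simp [mongeanLoop_eq D []]
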